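-- pv_equiv track=rewrite | github.com/sukhada-sukhada/lc4eu | skt-en/src/lc-debugger-new.py | split_to_different_mrs
-- ===== SOURCE A (Python) =====
-- def split_to_different_mrs(s):
--     """We take as input a string containing multiple MRS, and split it into different MRS"""
--     st = []
--     op = [[]]
--     for i in s:
--         if i in '[{<(':
--             st.append(i)
--             op[-1].append(i)
--         elif i in ']}>)':
--             st.pop()
--             op[-1].append(i)
--         else:
--             op[-1].append(i)
--         if len(st) == 0 and len(op[-1]) != 0:
--             op.append([])
--     for idx in range(len(op)):
--         op[idx] = ''.join(op[idx]).rstrip()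
--     op = [x for x in op if len(x) != 0]
--     return op
-- ===== SOURCE B (Python) =====
-- def split_to_different_mrs(s):
--     """We take as input a string containing multiple MRS, and split it into different MRS"""
--     # Pass 1: find cut points -- indices after which bracket depth is back to 0.
--     depth = 0
--     cuts = []
--     for i, c in enumerate(s):
--         if c in '[{<(':
--             depth += 1
--         elif c in ']}>)':
--             depth -= 1
--         if depth == 0:
--             cuts.append(i)
--     # Pass 2: slice the original string at the cut points (plus any open remainder).
--     slices = []
--     start = 0
--     for b in cuts:
--         slices.append(s[start:b + 1])
--         start = b + 1
--     if start < len(s):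
--         slices.append(s[start:])
--     return [t for t in (x.rstrip() for x in slices) if t]
-- ===== Notes on version B (the rewrite author's own statement) =====
-- stated objective: alternative
-- what changed: B replaces A's single-pass list-of-char-lists accumulation (bracket stack + op[-1].append per character) by a two-pass cut-point algorithm: pass 1 computes the indices where bracket depth returns to 0 with an integer counter, pass 2 slices the original string at those indices; rstrip/drop-empty unchanged.
import Mathlib
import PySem

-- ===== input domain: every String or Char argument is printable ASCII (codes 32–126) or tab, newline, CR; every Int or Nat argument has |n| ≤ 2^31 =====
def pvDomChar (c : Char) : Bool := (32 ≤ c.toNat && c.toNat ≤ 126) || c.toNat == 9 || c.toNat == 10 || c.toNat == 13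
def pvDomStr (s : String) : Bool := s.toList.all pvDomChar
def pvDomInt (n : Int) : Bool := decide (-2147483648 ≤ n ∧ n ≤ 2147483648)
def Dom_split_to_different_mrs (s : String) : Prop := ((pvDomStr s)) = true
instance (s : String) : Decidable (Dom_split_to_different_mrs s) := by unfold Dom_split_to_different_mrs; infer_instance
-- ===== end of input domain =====

-- B is an alternative two-pass algorithm: cut-point indices via a depth counter, then slicing;
-- A accumulates lists of characters behind a bracket stack. Same result on Pre_ (A raises outside it).

def pvOpenC (c : Char) : Bool := c == '[' || c == '{' || c == '<' || c == '('
def pvCloseC (c : Char) : Bool := c == ']' || c == '}' || c == '>' || c == ')'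

-- shared final step of BOTH Pythons: ''.join/rstrip each segment, drop the empty ones
def pvFinish (xs : List (List Char)) : List String :=
  (xs.map (fun seg => String.ofList (PySem.Chars.rstrip seg))).filter (fun x => PySem.Str.len x != 0)

-- ===== PORT A =====
-- the for-loop over s: state (st, op-as-(done, current)); st.pop() on [] is where Python raises (excluded by Pre_)
def pvLoopA : List Char → List Char → List (List Char) → List Char → List (List Char)
  | [], _st, done, cur => done ++ [cur]
  | c :: rest, st, done, cur =>
    let st' := if pvOpenC c then c :: st else if pvCloseC c then st.tail else st
    let cur' := cur ++ [c]
    if st'.length == 0 && !(cur'.length == 0) then pvLoopA rest st' (done ++ [cur']) []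
    else pvLoopA rest st' done cur'

def split_to_different_mrs (s : String) : List String :=
  pvFinish (pvLoopA s.toList [] [] [])

-- ===== PORT B =====
-- pass 1: indices after which depth == 0 (depth is an Int, as in Source B)
def pvCutsB : List Char → Nat → Int → List Nat
  | [], _i, _d => []
  | c :: rest, i, d =>
    let d' := if pvOpenC c then d + 1 else if pvCloseC c then d - 1 else d
    if d' == 0 then i :: pvCutsB rest (i + 1) d' else pvCutsB rest (i + 1) d'

-- pass 2: s[start:b+1] for consecutive cut points, plus the open remainder s[start:]
def pvSlicesB (full : List Char) : List Nat → Nat → List (List Char)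
  | [], start => if start < full.length then [PySem.List.slice full (some (start : Int)) none] else []
  | b :: bs, start => PySem.List.slice full (some (start : Int)) (some ((b : Int) + 1)) :: pvSlicesB full bs (b + 1)

def split_to_different_mrs_alt (s : String) : List String :=
  pvFinish (pvSlicesB s.toList (pvCutsB s.toList 0 0) 0)

-- ===== PRECONDITION & SPEC =====
-- Pre_ excludes exactly the strings on which A raises IndexError (st.pop() on an empty stack):
-- some prefix has more closing than opening brackets.
def Pre_split_to_different_mrs (s : String) : Prop :=
  ∀ p ∈ s.toList.inits, p.countP (fun c => pvCloseC c) ≤ p.countP (fun c => pvOpenC c)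
instance (s : String) : Decidable (Pre_split_to_different_mrs s) := by
  unfold Pre_split_to_different_mrs; infer_instance

def pvWitness_split_to_different_mrs : String := "[a] b"

def Spec_split_to_different_mrs (s : String) (out : List String) : Prop := out = split_to_different_mrs_alt s
instance (s : String) (out : List String) : Decidable (Spec_split_to_different_mrs s out) := by
  unfold Spec_split_to_different_mrs; infer_instance

-- ===== CLAIM (what is proved, stated in full; the proofs are below) =====
def Claim_equal_split_to_different_mrs : Prop := ∀ (s : String), Dom_split_to_different_mrs s → Pre_split_to_different_mrs s → Spec_split_to_different_mrs s (split_to_different_mrs s)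

-- ===== LEMMAS AND PROOFS =====

-- common reference segmentation both ports are reduced to (Nat depth, clamped like A's st.tail)
def pvStep (d : Nat) (c : Char) : Nat := if pvOpenC c then d + 1 else if pvCloseC c then d - 1 else d

def pvSegs : Nat → List Char → List Char → List (List Char)
  | _d, cur, [] => [cur]
  | d, cur, c :: rest =>
    if pvStep d c == 0 then (cur ++ [c]) :: pvSegs 0 [] rest
    else pvSegs (pvStep d c) (cur ++ [c]) rest

lemma pvLoopA_eq_segs (rest : List Char) : ∀ (st : List Char) (done : List (List Char)) (cur : List Char),
    pvLoopA rest st done cur = done ++ pvSegs st.length cur rest := by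
  induction rest with
  | nil => intro st done cur; rfl
  | cons c rest ih =>
    intro st done cur
    have hlen : (if pvOpenC c then c :: st else if pvCloseC c then st.tail else st).length
        = pvStep st.length c := by
      unfold pvStep; split_ifs <;> simp
    have hcond : ((if pvOpenC c then c :: st else if pvCloseC c then st.tail else st).length == 0
        && !((cur ++ [c]).length == 0)) = (pvStep st.length c == 0) := by
      rw [hlen]; simp
    simp only [pvLoopA, hcond]
    by_cases h : pvStep st.length c = 0
    · rw [if_pos (by simp [h]), ih, hlen, h]
      simp [pvSegs, h]
    · rw [if_neg (by simp [h]), ih, hlen]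
      simp only [pvSegs]
      rw [if_neg (by simp [h])]

lemma pvFinish_cons (a : List Char) (l : List (List Char)) :
    pvFinish (a :: l) = pvFinish [a] ++ pvFinish l := by
  simp only [pvFinish, List.map_cons, List.filter_cons, List.map_nil, List.filter_nil]
  split <;> simp

lemma pvFinish_nil_seg : pvFinish [([] : List Char)] = [] := by decide

lemma pvSlices_eq_segs (rest : List Char) : ∀ (d : Nat) (cur pre : List Char),
    (∀ p ∈ rest.inits, p.countP (fun c => pvCloseC c) ≤ d + p.countP (fun c => pvOpenC c)) →
    pvFinish (pvSlicesB (pre ++ (cur ++ rest)) (pvCutsB rest (pre.length + cur.length) (d : Int)) pre.length)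
      = pvFinish (pvSegs d cur rest) := by
  induction rest with
  | nil =>
    intro d cur pre _h
    cases cur with
    | nil =>
      simp only [pvSegs, pvFinish_nil_seg, pvCutsB, pvSlicesB]
      simp [pvFinish]
    | cons x xs =>
      simp only [pvSegs, pvCutsB, pvSlicesB]
      rw [if_pos (by simp), PySem.List.slice_from_natCast, List.drop_left]
      simp
  | cons c rest ih =>
    intro d cur pre h
    have h1 : pvCloseC c = true → pvOpenC c = false → 1 ≤ d := by
      intro hcc hoc
      have := h [c] ((List.mem_inits _ _).2 ⟨rest, rfl⟩)
      simpa [List.countP_cons, hcc, hoc] using this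
    have hcast : (if pvOpenC c then (d : Int) + 1 else if pvCloseC c then (d : Int) - 1 else (d : Int))
        = ((pvStep d c : Nat) : Int) := by
      unfold pvStep
      cases hoc : pvOpenC c
      · cases hcc : pvCloseC c
        · simp
        · have hd := h1 hcc hoc
          simp
          omega
      · simp
    have h' : ∀ p ∈ rest.inits,
        p.countP (fun c => pvCloseC c) ≤ pvStep d c + p.countP (fun c => pvOpenC c) := by
      intro p hp
      have hmem : c :: p ∈ (c :: rest).inits :=
        (List.mem_inits _ _).2 (List.cons_prefix_cons.mpr ⟨rfl, (List.mem_inits _ _).1 hp⟩)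
      have hcp := h _ hmem
      simp only [List.countP_cons] at hcp
      unfold pvStep
      cases hoc : pvOpenC c
      · cases hcc : pvCloseC c
        · simp [hoc, hcc] at hcp ⊢
          omega
        · have hd := h1 hcc hoc
          simp [hoc, hcc] at hcp ⊢
          omega
      · simp [hoc] at hcp ⊢
        omega
    simp only [pvSegs, pvCutsB, hcast]
    by_cases hz : pvStep d c = 0
    · rw [if_pos (by simp [hz]), if_pos (by simp [hz])]
      simp only [pvSlicesB]
      have hslice : PySem.List.slice (pre ++ (cur ++ c :: rest)) (some ((pre.length : Int)))
          (some (((pre.length + cur.length : Nat) : Int) + 1)) = cur ++ [c] := by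
        have hc : (((pre.length + cur.length : Nat) : Int) + 1)
            = ((pre.length + cur.length + 1 : Nat) : Int) := by push_cast; ring
        rw [hc, PySem.List.slice_natCast, List.drop_left]
        have ha : cur ++ c :: rest = (cur ++ [c]) ++ rest := by simp
        rw [ha, show pre.length + cur.length + 1 - pre.length = (cur ++ [c]).length by simp; omega]
        exact List.take_left
      rw [hslice, pvFinish_cons _ (pvSlicesB _ _ _), pvFinish_cons _ (pvSegs 0 [] rest)]
      congr 1
      have hih := ih 0 [] (pre ++ (cur ++ [c])) (by simpa [hz] using h')
      simpa [hz, Nat.add_assoc] using hih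
    · rw [if_neg (by simp [hz]), if_neg (by simp [hz])]
      have hih := ih (pvStep d c) (cur ++ [c]) pre h'
      simpa [Nat.add_assoc] using hih

-- ===== VERDICT (by name: the statement is the Claim_ definition above) =====
theorem split_to_different_mrs_spec : Claim_equal_split_to_different_mrs := by
  intro s _hdom hpre
  unfold Spec_split_to_different_mrs split_to_different_mrs split_to_different_mrs_alt
  rw [pvLoopA_eq_segs]
  have := pvSlices_eq_segs s.toList 0 [] [] (by intro p hp; simpa using hpre p hp)
  simpa using this.symm
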